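-- pv_equiv track=rewrite | github.com/Lecrut/Diffusion-code-generation | data/code/30_10_2.py | swap_characters
-- ===== SOURCE A (Python) =====
-- def swap_characters(s: str) -> str:
--     n = len(s)
--     if n < 2:
--         return s
--     s_list = list(s)
--     for i in range(0, n - 1, 2):
--         s_list[i], s_list[i+1] = s_list[i+1], s_list[i]
--     return "".join(s_list)
-- ===== SOURCE B (Python) =====
-- def swap_characters(s: str) -> str:
--     return "".join(s[i:i+2][::-1] for i in range(0, len(s), 2))
-- ===== Notes on version B (the rewrite author's own statement) =====
-- stated objective: simpler
-- what changed: Replaces the mutable char-list with in-place swaps at even indices by directly joining each reversed length-2 slice, which also makes the n<2 guard unnecessary.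
import Mathlib
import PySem

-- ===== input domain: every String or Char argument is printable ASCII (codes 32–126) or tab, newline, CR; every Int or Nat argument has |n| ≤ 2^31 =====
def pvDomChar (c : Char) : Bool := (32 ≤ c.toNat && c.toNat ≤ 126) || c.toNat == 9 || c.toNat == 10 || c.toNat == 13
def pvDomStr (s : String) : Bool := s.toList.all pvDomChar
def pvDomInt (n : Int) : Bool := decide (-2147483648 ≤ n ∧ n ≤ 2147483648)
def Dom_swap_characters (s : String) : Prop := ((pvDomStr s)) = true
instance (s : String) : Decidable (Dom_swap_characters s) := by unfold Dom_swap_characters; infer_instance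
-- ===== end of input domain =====

-- B joins each reversed length-2 slice instead of swapping inside a mutable list; same O(n) cost, no guard needed.

-- ===== PORT A =====
-- one loop body: s_list[i], s_list[i+1] = s_list[i+1], s_list[i]
-- (Python reads both right-hand sides, then assigns; the lookups are ported with
-- pyGet?, the assignments with List.set at the nonnegative indices i and i+1;
-- both indices are always in range in A's loop, so the fallback arm never fires there)
def stepA (l : List Char) (i : Int) : List Char :=
  match PySem.List.pyGet? l (i + 1), PySem.List.pyGet? l i with
  | some x, some y => (l.set i.toNat x).set (i + 1).toNat y
  | _, _ => l

def swap_characters (s : String) : String :=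
  let n : Int := s.toList.length
  if n < 2 then s
  else
    let sList := s.toList
    let sList := (PySem.List.pyRange 0 (n - 1) 2).foldl stepA sList
    String.ofList sList

-- ===== PORT B =====
-- chunk s[i:i+2], reversed ([::-1] is reverse: PySem.List.slice?_none_none_neg_one), joined
def swap_characters_alt (s : String) : String :=
  String.ofList
    (((PySem.List.pyRange 0 s.toList.length 2).map
        (fun i => (PySem.List.slice s.toList (some i) (some (i + 2))).reverse)).flatten)

-- ===== PRECONDITION & SPEC =====
def Spec_swap_characters (s : String) (out : String) : Prop := out = swap_characters_alt s
instance (s : String) (out : String) : Decidable (Spec_swap_characters s out) := by unfold Spec_swap_characters; infer_instance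

-- ===== CLAIM (what is proved, stated in full; the proofs are below) =====
def Claim_equal_swap_characters : Prop := ∀ (s : String), Dom_swap_characters s → Spec_swap_characters s (swap_characters s)

-- ===== LEMMAS AND PROOFS =====

-- the common reference: swap adjacent pairs
def pairSwap : List Char → List Char
  | a :: b :: t => b :: a :: pairSwap t
  | l => l

-- step-2 range unfolds one element at a time
theorem pyRange_two_cons (m : Int) (hm : 0 < m) :
    PySem.List.pyRange 0 m 2 = 0 :: (PySem.List.pyRange 0 (m - 2) 2).map (· + 2) := by
  rw [PySem.List.pyRange_of_pos _ _ (by norm_num : (0:Int) < 2),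
      PySem.List.pyRange_of_pos _ _ (by norm_num : (0:Int) < 2)]
  by_cases h2 : 2 < m
  · simp only [if_pos hm, if_pos (by omega : (0:Int) < m - 2)]
    have : ((m - 0 + 2 - 1) / 2).toNat = ((m - 2 - 0 + 2 - 1) / 2).toNat + 1 := by omega
    rw [this, List.range_succ_eq_map]
    simp only [List.map_cons, List.map_map]
    refine congrArg₂ List.cons (by norm_num) (List.map_congr_left fun k _ => ?_)
    simp only [Function.comp_apply]
    push_cast
    ring
  · simp only [if_pos hm, if_neg (by omega : ¬ (0:Int) < m - 2)]
    have : ((m - 0 + 2 - 1) / 2).toNat = 1 := by omega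
    rw [this]
    norm_num [List.range_succ]

theorem stepA_zero (a b : Char) (t : List Char) :
    stepA (a :: b :: t) 0 = b :: a :: t := by
  have h1 : PySem.List.pyGet? (a :: b :: t) (0 + 1) = some b := by
    rw [show ((0:Int) + 1) = ((1 : Nat) : Int) by norm_num, PySem.List.pyGet?_natCast]
    rfl
  have h0 : PySem.List.pyGet? (a :: b :: t) 0 = some a := by
    rw [show ((0:Int)) = ((0 : Nat) : Int) by norm_num, PySem.List.pyGet?_natCast]
    rfl
  simp only [stepA, h1, h0]
  rfl

theorem stepA_shift (x y : Char) (l : List Char) (i : Int) (hi : 0 ≤ i) :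
    stepA (x :: y :: l) (i + 2) = x :: y :: stepA l i := by
  obtain ⟨k, rfl⟩ := Int.eq_ofNat_of_zero_le hi
  have hA : PySem.List.pyGet? (x :: y :: l) ((k : Int) + 2 + 1) = l[k + 1]? := by
    rw [show ((k : Int) + 2 + 1) = ((k + 3 : Nat) : Int) by push_cast; ring,
        PySem.List.pyGet?_natCast]
    simp
  have hB : PySem.List.pyGet? (x :: y :: l) ((k : Int) + 2) = l[k]? := by
    rw [show ((k : Int) + 2) = ((k + 2 : Nat) : Int) by push_cast; ring,
        PySem.List.pyGet?_natCast]
    simp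
  have hC : PySem.List.pyGet? l ((k : Int) + 1) = l[k + 1]? := by
    rw [show ((k : Int) + 1) = ((k + 1 : Nat) : Int) by push_cast; ring,
        PySem.List.pyGet?_natCast]
  have hD : PySem.List.pyGet? l (k : Int) = l[k]? := PySem.List.pyGet?_natCast l k
  have t1 : ((k : Int) + 2).toNat = k + 2 := by omega
  have t2 : ((k : Int) + 2 + 1).toNat = k + 3 := by omega
  have t3 : ((k : Int) + 1).toNat = k + 1 := by omega
  have t4 : ((k : Int)).toNat = k := by omega
  simp only [stepA, hA, hB, hC, hD, t1, t2, t3, t4]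
  cases h1 : l[k + 1]? <;> cases h2 : l[k]? <;> rfl

-- a fold of shifted steps leaves a two-element prefix alone
theorem foldl_stepA_shift (x y : Char) (r : List Int) (hr : ∀ i ∈ r, 0 ≤ i) :
    ∀ l : List Char,
      r.foldl (fun acc i => stepA acc (i + 2)) (x :: y :: l) =
        x :: y :: r.foldl stepA l := by
  induction r with
  | nil => intro l; rfl
  | cons i r ih =>
    intro l
    have hi : 0 ≤ i := hr i (List.mem_cons_self ..)
    simp only [List.foldl_cons, stepA_shift x y l i hi]
    exact ih (fun j hj => hr j (List.mem_cons_of_mem _ hj)) _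

theorem mem_pyRange_two_nonneg (m i : Int) (h : i ∈ PySem.List.pyRange 0 m 2) : 0 ≤ i := by
  rw [PySem.List.pyRange_of_pos _ _ (by norm_num : (0:Int) < 2)] at h
  obtain ⟨k, _, rfl⟩ := List.mem_map.mp h
  positivity

theorem foldA_eq_pairSwap :
    ∀ l : List Char,
      (PySem.List.pyRange 0 ((l.length : Int) - 1) 2).foldl stepA l = pairSwap l
  | [] => by norm_num [PySem.List.pyRange_of_pos 0 (-1) (by norm_num : (0:Int) < 2), pairSwap]
  | [a] => by norm_num [PySem.List.pyRange_of_pos 0 0 (by norm_num : (0:Int) < 2), pairSwap]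
  | a :: b :: t => by
    have hlen : ((a :: b :: t).length : Int) - 1 = (t.length : Int) + 1 := by
      simp
    rw [hlen, pyRange_two_cons _ (by positivity)]
    simp only [List.foldl_cons, List.foldl_map, stepA_zero]
    have hsub : ((t.length : Int) + 1 - 2) = (t.length : Int) - 1 := by ring
    rw [hsub,
        foldl_stepA_shift b a _ (fun i hi => mem_pyRange_two_nonneg _ i hi) t,
        foldA_eq_pairSwap t]
    rfl

theorem slice_shift (x y : Char) (l : List Char) (i : Int) (hi : 0 ≤ i) :
    PySem.List.slice (x :: y :: l) (some (i + 2)) (some (i + 2 + 2)) =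
      PySem.List.slice l (some i) (some (i + 2)) := by
  rw [PySem.List.slice_toNat _ (show (0:Int) ≤ i + 2 by omega) (show (0:Int) ≤ i + 2 + 2 by omega),
      PySem.List.slice_toNat _ hi (show (0:Int) ≤ i + 2 by omega)]
  have e1 : (i + 2).toNat = i.toNat + 2 := by omega
  have e2 : (i + 2 + 2).toNat = i.toNat + 2 + 2 := by omega
  rw [e1, e2]
  simp only [List.drop_succ_cons]
  congr 1
  omega

theorem altList_eq_pairSwap :
    ∀ l : List Char,
      ((PySem.List.pyRange 0 (l.length : Int) 2).map
          (fun i => (PySem.List.slice l (some i) (some (i + 2))).reverse)).flatten =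
        pairSwap l
  | [] => by norm_num [PySem.List.pyRange_of_pos 0 0 (by norm_num : (0:Int) < 2), pairSwap]
  | [a] => by
    have hlen : ((([a] : List Char)).length : Int) = 1 := by simp
    rw [hlen, pyRange_two_cons 1 (by norm_num)]
    norm_num [PySem.List.pyRange_of_pos 0 (-1) (by norm_num : (0:Int) < 2), pairSwap,
      PySem.List.slice_to]
  | a :: b :: t => by
    have hlen : ((a :: b :: t).length : Int) = (t.length : Int) + 2 := by
      simp
      omega
    rw [hlen, pyRange_two_cons _ (by positivity)]
    simp only [List.map_cons, List.map_map, List.flatten_cons]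
    have h0 : (PySem.List.slice (a :: b :: t) (some 0) (some (0 + 2))).reverse = [b, a] := by
      rw [PySem.List.slice_toNat _ (le_refl (0:Int)) (show (0:Int) ≤ 0 + 2 by norm_num)]
      rfl
    have hmap :
        ((PySem.List.pyRange 0 ((t.length : Int) + 2 - 2) 2).map
            ((fun i => (PySem.List.slice (a :: b :: t) (some i) (some (i + 2))).reverse) ∘ (· + 2))) =
          (PySem.List.pyRange 0 (t.length : Int) 2).map
            (fun i => (PySem.List.slice t (some i) (some (i + 2))).reverse) := by
      have hs : ((t.length : Int) + 2 - 2) = (t.length : Int) := by ring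
      rw [hs]
      refine List.map_congr_left (fun i hi => ?_)
      have h0i := mem_pyRange_two_nonneg _ i hi
      simp only [Function.comp_apply]
      rw [slice_shift a b t i h0i]
    rw [h0, hmap, altList_eq_pairSwap t]
    rfl

-- ===== VERDICT (by name: the statement is the Claim_ definition above) =====
theorem swap_characters_spec : Claim_equal_swap_characters := by
  intro s _
  show swap_characters s = swap_characters_alt s
  unfold swap_characters swap_characters_alt
  rw [altList_eq_pairSwap]
  by_cases h : (s.toList.length : Int) < 2
  · simp only [if_pos h]
    have hp : pairSwap s.toList = s.toList := by
      match hs : s.toList, h with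
      | [], _ => rfl
      | [a], _ => rfl
      | a :: b :: t, h => exfalso; simp at h; omega
    rw [hp]
    simp
  · simp only [if_neg h, foldA_eq_pairSwap]
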